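-- pv_equiv track=rewrite | github.com/ghu999/mit6.1010 | sat/lab.py | satisfying_assignment
-- ===== SOURCE A (Python) =====
-- def satisfying_assignment(formula):
--     """
--     Find a satisfying assignment for a given CNF formula.
--     Returns that assignment if one exists, or None otherwise.
--
--     >>> satisfying_assignment([])
--     {}
--     >>> T, F = True, False
--     >>> x = satisfying_assignment([[('a', T), ('b', F), ('c', T)]])
--     >>> x.get('a', None) is T or x.get('b', None) is F or x.get('c', None) is T
--     True
--     >>> satisfying_assignment([[('a', T)], [('a', F)]])
--     """
--     def recur(formula, assignments):
--         if not formula: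
--             return assignments
--         if [] in formula:
--             return None
--         for clause in formula:
--             if len(clause) == 1:
--                 updated = update_expression(formula, [(clause[0][0], clause[0][1])])
--                 new_assignments = assignments.copy()
--                 new_assignments[clause[0][0]] = clause[0][1]
--                 return recur(updated, new_assignments)
--         var = formula[0][0][0]
--         for val in [True, False]:
--             updated = update_expression(formula, [(var, val)])
--             new_assignments = assignments.copy()
--             new_assignments[var] = val
--             result = recur(updated, new_assignments)
--             if result is not None:
--                 return result
--         return None
--     return recur(formula, {})
--
-- def update_expression(formula, conditions):
--     """
--     Updates the expression given each condition whether a variable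
--     is set to True or False.
--     """
--     lookup = dict(conditions)
--     result = []
--     for clause in formula:
--         new_clause = []
--         satisfied = False
--         for exp, val in clause:
--             if exp in lookup:
--                 if val == lookup[exp]:
--                     satisfied = True
--                     break
--             else:
--                 new_clause.append((exp, val))
--
--         if not satisfied:
--             result.append(new_clause)
--     return result
-- ===== SOURCE B (Python) =====
-- def satisfying_assignment(formula):
--     """Iterative DPLL: explicit stack of (formula, assignments) frames instead of recursion."""
--     stack = [(formula, {})]
--     while stack:
--         f, asg = stack.pop()
--         if not f:
--             return asg
--         if [] in f:
--             continue
--         unit = next((c for c in f if len(c) == 1), None)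
--         if unit is not None:
--             x, v = unit[0]
--             stack.append((_assign(f, x, v), {**asg, x: v}))
--         else:
--             x = f[0][0][0]
--             # push False frame first so the True frame is tried first
--             stack.append((_assign(f, x, False), {**asg, x: False}))
--             stack.append((_assign(f, x, True), {**asg, x: True}))
--     return None
--
-- def _assign(f, x, v):
--     """Set variable x to v: drop satisfied clauses, strip x-literals from the rest."""
--     return [[lit for lit in c if lit[0] != x] for c in f if (x, v) not in c]
-- ===== Notes on version B (the rewrite author's own statement) =====
-- stated objective: alternative
-- what changed: Replaced A's recursive backtracking (with a helper that rebuilds a lookup dict and scans clauses with a break flag) by an iterative DPLL solver driven by an explicit stack of (formula, assignments) frames, where branching pushes the False frame then the True frame and backtracking is just popping, and clause update is a membership-test-plus-filter comprehension.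
import Mathlib
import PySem

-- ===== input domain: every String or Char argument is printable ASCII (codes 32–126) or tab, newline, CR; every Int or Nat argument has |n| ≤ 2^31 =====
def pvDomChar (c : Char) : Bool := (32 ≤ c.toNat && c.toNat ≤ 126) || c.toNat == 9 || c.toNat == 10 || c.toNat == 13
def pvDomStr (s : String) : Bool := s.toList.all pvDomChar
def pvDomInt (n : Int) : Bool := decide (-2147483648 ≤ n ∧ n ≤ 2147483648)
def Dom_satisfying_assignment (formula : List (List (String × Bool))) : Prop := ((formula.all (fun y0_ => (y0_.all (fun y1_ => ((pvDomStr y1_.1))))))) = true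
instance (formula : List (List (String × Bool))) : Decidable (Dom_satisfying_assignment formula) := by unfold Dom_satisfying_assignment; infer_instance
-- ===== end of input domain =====

-- B replaces A's recursive backtracking by an iterative DPLL loop over an explicit stack of
-- (formula, assignments) frames (objective: alternative decomposition, same cost).

-- total number of literals in a formula (termination measure for both ports)
def pvNumLits (f : List (List (String × Bool))) : Nat := (f.map List.length).sum

-- length contributed by an optional clause (none = clause satisfied and dropped)
def pvSizeO (o : Option (List (String × Bool))) : Nat := o.elim 0 List.length

-- ===== PORT A =====
-- inner loop of update_expression over one clause (break on satisfaction = return none)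
def updClauseA (lookup : PySem.Dict String Bool) : List (String × Bool) → Option (List (String × Bool))
  | [] => some []
  | (exp, val) :: rest =>
    match lookup.get? exp with
    | some w => if val == w then none else updClauseA lookup rest
    | none => (updClauseA lookup rest).map (fun nc => (exp, val) :: nc)

def update_expression (formula : List (List (String × Bool))) (conditions : List (String × Bool)) :
    List (List (String × Bool)) :=
  let lookup := PySem.Dict.ofList conditions
  formula.filterMap (updClauseA lookup)

-- the 'for clause in formula: if len(clause) == 1' scan of A
def findUnitA : List (List (String × Bool)) → Option (String × Bool)
  | [] => none
  | [p] :: _ => some p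
  | _ :: rest => findUnitA rest

-- termination helper lemmas (cited by the ports' decreasing_by)
lemma updClauseA_le (L : PySem.Dict String Bool) (c : List (String × Bool)) :
    pvSizeO (updClauseA L c) ≤ c.length := by
  induction c with
  | nil => simp [updClauseA, pvSizeO]
  | cons p rest ih =>
    obtain ⟨e, w⟩ := p
    simp only [updClauseA]
    cases h : L.get? e with
    | some v =>
      by_cases hw : (w == v) = true <;> simp [hw, pvSizeO] at ih ⊢ <;> omega
    | none =>
      cases hr : updClauseA L rest <;> simp [pvSizeO] at ih ⊢ <;> simp_all [pvSizeO]

lemma updClauseA_lt (L : PySem.Dict String Bool) (c : List (String × Bool))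
    (h : ∃ q ∈ c, (L.get? q.1).isSome) : pvSizeO (updClauseA L c) < c.length := by
  induction c with
  | nil => simp at h
  | cons p rest ih =>
    obtain ⟨e, w⟩ := p
    simp only [updClauseA]
    cases hg : L.get? e with
    | some v =>
      by_cases hw : (w == v) = true
      · simp [hw, pvSizeO]
      · simp [hw]
        have := updClauseA_le L rest
        omega
    | none =>
      have h' : ∃ q ∈ rest, (L.get? q.1).isSome := by
        rcases h with ⟨q, hq, hs⟩
        rcases List.mem_cons.mp hq with rfl | hq'
        · simp [hg] at hs
        · exact ⟨q, hq', hs⟩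
      have := ih h'
      cases hr : updClauseA L rest <;> simp [hr, pvSizeO] at this ⊢ <;> omega

lemma numLits_filterMap (L : PySem.Dict String Bool) (f : List (List (String × Bool))) :
    pvNumLits (f.filterMap (updClauseA L)) = (f.map (fun c => pvSizeO (updClauseA L c))).sum := by
  induction f with
  | nil => simp [pvNumLits]
  | cons c rest ih =>
    cases h : updClauseA L c <;> simp [h, pvNumLits, pvSizeO] at ih ⊢ <;> omega

lemma sum_map_lt {α : Type} (g h : α → Nat) (hle : ∀ a, g a ≤ h a)
    (f : List α) (c : α) (hc : c ∈ f) (hlt : g c < h c) :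
    (f.map g).sum < (f.map h).sum := by
  induction f with
  | nil => simp at hc
  | cons d rest ih =>
    rcases List.mem_cons.mp hc with rfl | hc'
    · have := List.sum_le_sum (fun a (_ : a ∈ rest) => hle a)
      simp; omega
    · have := ih hc'
      have := hle d
      simp; omega

lemma numLits_update_lt (L : PySem.Dict String Bool) (f : List (List (String × Bool)))
    (c : List (String × Bool)) (hc : c ∈ f) (h : ∃ q ∈ c, (L.get? q.1).isSome) :
    pvNumLits (f.filterMap (updClauseA L)) < pvNumLits f := by
  rw [numLits_filterMap]
  exact sum_map_lt _ _ (updClauseA_le L) f c hc (updClauseA_lt L c h)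

lemma findUnitA_mem (f : List (List (String × Bool))) (p : String × Bool)
    (h : findUnitA f = some p) : [p] ∈ f := by
  induction f with
  | nil => simp [findUnitA] at h
  | cons c rest ih =>
    match c, h with
    | [], h => exact List.mem_cons_of_mem _ (ih h)
    | [q], h => simp [findUnitA] at h; simp [h]
    | q :: r :: s, h => exact List.mem_cons_of_mem _ (ih h)

lemma get?_single (x y : String) (v : Bool) :
    (PySem.Dict.ofList [(x, v)]).get? y = if x == y then some v else none := by
  simp [PySem.Dict.ofList, PySem.Dict.update, PySem.Dict.insert, PySem.Dict.empty,
    PySem.Dict.get?, PySem.Dict.contains]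

def recurA (f : List (List (String × Bool))) (a : PySem.Dict String Bool) :
    Option (PySem.Dict String Bool) :=
  if f = [] then some a
  else if [] ∈ f then none
  else
    match hu : findUnitA f with
    | some (x, v) => recurA (update_expression f [(x, v)]) (a.insert x v)
    | none =>
      match f with
      | ((x, w) :: cl) :: rest =>
        match recurA (update_expression (((x, w) :: cl) :: rest) [(x, true)]) (a.insert x true) with
        | some r => some r
        | none => recurA (update_expression (((x, w) :: cl) :: rest) [(x, false)]) (a.insert x false)
      | _ => none
termination_by pvNumLits f
decreasing_by
  · exact numLits_update_lt _ _ [(x, v)] (findUnitA_mem f (x, v) hu)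
      ⟨(x, v), by simp, by simp [get?_single]⟩
  · exact numLits_update_lt _ _ ((x, w) :: cl) (List.mem_cons_self ..)
      ⟨(x, w), by simp, by simp [get?_single]⟩
  · exact numLits_update_lt _ _ ((x, w) :: cl) (List.mem_cons_self ..)
      ⟨(x, w), by simp, by simp [get?_single]⟩

def satisfying_assignment (formula : List (List (String × Bool))) : Option (List (String × Bool)) :=
  (recurA formula PySem.Dict.empty).map PySem.Dict.items

-- ===== PORT B =====
-- B's _assign: drop satisfied clauses, strip x-literals from the rest
def assignB (f : List (List (String × Bool))) (x : String) (v : Bool) :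
    List (List (String × Bool)) :=
  (f.filter (fun c => !c.contains (x, v))).map (fun c => c.filter (fun p => !(p.1 == x)))

def pvClauseB (x : String) (v : Bool) (d : List (String × Bool)) : Nat :=
  if d.contains (x, v) then 0 else (d.filter (fun p => !(p.1 == x))).length

lemma numLits_assignB (f : List (List (String × Bool))) (x : String) (v : Bool) :
    pvNumLits (assignB f x v) = (f.map (pvClauseB x v)).sum := by
  induction f with
  | nil => simp [assignB, pvNumLits]
  | cons e r ihg =>
    by_cases he : (x, v) ∈ e <;>
      simp [assignB, pvNumLits, pvClauseB, he] at ihg ⊢ <;> omega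

lemma pvClauseB_le (x : String) (v : Bool) (d : List (String × Bool)) :
    pvClauseB x v d ≤ d.length := by
  unfold pvClauseB; split
  · omega
  · exact List.length_filter_le _ _

lemma numLits_assignB_lt (f : List (List (String × Bool))) (x : String) (v : Bool)
    (c : List (String × Bool)) (hc : c ∈ f) (h : ∃ q ∈ c, q.1 = x) :
    pvNumLits (assignB f x v) < pvNumLits f := by
  rw [numLits_assignB]
  apply sum_map_lt _ _ (pvClauseB_le x v) f c hc
  obtain ⟨q, hq, hqx⟩ := h
  unfold pvClauseB; split
  · cases c with
    | nil => simp at hq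
    | cons _ _ => simp
  · exact List.length_filter_lt_length_iff_exists.mpr ⟨q, hq, by simp [hqx]⟩

-- stack-frame measure for the iterative loop
def pvMeasure (st : List ((List (List (String × Bool))) × PySem.Dict String Bool)) : Nat :=
  (st.map (fun p => 3 ^ (pvNumLits p.1 + 1))).sum

lemma meas_pop (f : List (List (String × Bool))) (a : PySem.Dict String Bool)
    (st : List ((List (List (String × Bool))) × PySem.Dict String Bool)) :
    pvMeasure st < pvMeasure ((f, a) :: st) := by
  simp only [pvMeasure, List.map_cons, List.sum_cons]
  have : 0 < 3 ^ (pvNumLits f + 1) := by positivity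
  omega

lemma meas_one {f f' : List (List (String × Bool))} (a a' : PySem.Dict String Bool)
    (st : List ((List (List (String × Bool))) × PySem.Dict String Bool))
    (hlt : pvNumLits f' < pvNumLits f) :
    pvMeasure ((f', a') :: st) < pvMeasure ((f, a) :: st) := by
  simp only [pvMeasure, List.map_cons, List.sum_cons]
  have h1 : 3 ^ (pvNumLits f' + 1) ≤ 3 ^ pvNumLits f :=
    Nat.pow_le_pow_right (by norm_num) (by omega)
  have h3 : (3:Nat) ^ pvNumLits f < 3 ^ (pvNumLits f + 1) :=
    Nat.pow_lt_pow_right (by norm_num) (by omega)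
  omega

lemma meas_two {f f1 f2 : List (List (String × Bool))} (a a1 a2 : PySem.Dict String Bool)
    (st : List ((List (List (String × Bool))) × PySem.Dict String Bool))
    (hlt1 : pvNumLits f1 < pvNumLits f) (hlt2 : pvNumLits f2 < pvNumLits f) :
    pvMeasure ((f1, a1) :: (f2, a2) :: st) < pvMeasure ((f, a) :: st) := by
  simp only [pvMeasure, List.map_cons, List.sum_cons]
  have h1 : 3 ^ (pvNumLits f1 + 1) ≤ 3 ^ pvNumLits f :=
    Nat.pow_le_pow_right (by norm_num) (by omega)
  have h2 : 3 ^ (pvNumLits f2 + 1) ≤ 3 ^ pvNumLits f :=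
    Nat.pow_le_pow_right (by norm_num) (by omega)
  have h3 : 2 * (3:Nat) ^ pvNumLits f < 3 ^ (pvNumLits f + 1) := by
    have hp : 0 < (3:Nat) ^ pvNumLits f := by positivity
    have := Nat.pow_succ 3 (pvNumLits f); omega
  linarith

def loopB : List ((List (List (String × Bool))) × PySem.Dict String Bool) →
    Option (PySem.Dict String Bool)
  | [] => none
  | (f, a) :: st =>
    if f = [] then some a
    else if [] ∈ f then loopB st
    else
      match hu : f.find? (fun c => c.length == 1) with
      | some ((x, v) :: _) =>
        loopB ((assignB f x v, a.insert x v) :: st)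
      | some [] => loopB st   -- unreachable: find? guarantees length 1
      | none =>
        match f with
        | ((x, w) :: cl) :: rest =>
          loopB ((assignB (((x, w) :: cl) :: rest) x true, a.insert x true) ::
                 (assignB (((x, w) :: cl) :: rest) x false, a.insert x false) :: st)
        | _ => loopB st       -- unreachable: f nonempty with nonempty clauses
termination_by st => pvMeasure st
decreasing_by
  · exact meas_pop f a st
  · exact meas_one a (a.insert x v) st
      (numLits_assignB_lt f x v _ (List.mem_of_find?_eq_some hu) ⟨(x, v), by simp, rfl⟩)
  · exact meas_pop f a st
  · exact meas_two a (a.insert x true) (a.insert x false) st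
      (numLits_assignB_lt _ x true ((x, w) :: cl) (List.mem_cons_self ..) ⟨(x, w), by simp, rfl⟩)
      (numLits_assignB_lt _ x false ((x, w) :: cl) (List.mem_cons_self ..) ⟨(x, w), by simp, rfl⟩)
  · exact meas_pop _ a st

def satisfying_assignment_alt (formula : List (List (String × Bool))) :
    Option (List (String × Bool)) :=
  (loopB [(formula, PySem.Dict.empty)]).map PySem.Dict.items

-- ===== PRECONDITION & SPEC =====
def Spec_satisfying_assignment (formula : List (List (String × Bool))) (out : Option (List (String × Bool))) : Prop := out = satisfying_assignment_alt formula
instance (formula : List (List (String × Bool))) (out : Option (List (String × Bool))) : Decidable (Spec_satisfying_assignment formula out) := by unfold Spec_satisfying_assignment; infer_instance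

-- ===== CLAIM (what is proved, stated in full; the proofs are below) =====
def Claim_equal_satisfying_assignment : Prop := ∀ (formula : List (List (String × Bool))), Dom_satisfying_assignment formula → Spec_satisfying_assignment formula (satisfying_assignment formula)

-- ===== LEMMAS AND PROOFS =====

-- A's clause update with the singleton lookup dict IS B's membership-test-plus-filter
lemma updClauseA_single (x : String) (v : Bool) (c : List (String × Bool)) :
    updClauseA (PySem.Dict.ofList [(x, v)]) c =
      if c.contains (x, v) then none else some (c.filter (fun p => !(p.1 == x))) := by
  induction c with
  | nil => simp [updClauseA]
  | cons p rest ih =>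
    obtain ⟨e, w⟩ := p
    simp only [updClauseA, get?_single, List.contains_cons, List.filter_cons]
    by_cases hx : x = e
    · subst hx
      by_cases hw : w = v
      · subst hw; simp
      · have hvw : ¬ v = w := fun h => hw h.symm
        simp [ih, hvw]
        exact fun h => absurd h hw
    · have hne : (x == e) = false := by simp [hx]
      by_cases hcont : (x, v) ∈ rest <;>
        simp [hne, ih, hcont, Ne.symm hx]
      exact fun h => absurd h hx

lemma update_eq_assign (f : List (List (String × Bool))) (x : String) (v : Bool) :
    update_expression f [(x, v)] = assignB f x v := by
  unfold update_expression assignB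
  induction f with
  | nil => simp
  | cons c rest ih =>
    simp only [List.filterMap_cons, updClauseA_single, List.filter_cons,
      List.contains_eq_mem] at ih ⊢
    by_cases hm : (x, v) ∈ c <;> simp [hm] <;> simpa using ih

-- A's unit-clause scan IS find? with the length-1 predicate
lemma findUnitA_eq (f : List (List (String × Bool))) :
    findUnitA f = (f.find? (fun c => c.length == 1)).map (fun c => c.headD ("", true)) := by
  induction f with
  | nil => simp [findUnitA]
  | cons c rest ih =>
    match c with
    | [] => simpa [findUnitA, List.find?] using ih
    | [p] => simp [findUnitA, List.find?]
    | p :: q :: r => simpa [findUnitA, List.find?] using ih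

-- unfold lemmas for the two well-founded recursions
lemma recurA_nil (a : PySem.Dict String Bool) : recurA [] a = some a := by
  rw [recurA]; simp

lemma recurA_conflict (f : List (List (String × Bool))) (a : PySem.Dict String Bool)
    (h : [] ∈ f) : recurA f a = none := by
  have hf : f ≠ [] := by rintro rfl; simp at h
  rw [recurA]; simp [hf, h]

lemma recurA_unit (f : List (List (String × Bool))) (a : PySem.Dict String Bool)
    (x : String) (v : Bool) (hf : f ≠ []) (hc : [] ∉ f) (hu : findUnitA f = some (x, v)) :
    recurA f a = recurA (update_expression f [(x, v)]) (a.insert x v) := by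
  rw [recurA, if_neg hf, if_neg hc]
  split
  all_goals rename_i heq
  · rw [hu] at heq; simp at heq; obtain ⟨rfl, rfl⟩ := heq; rfl
  · rw [hu] at heq; simp at heq

lemma recurA_branch (x : String) (w : Bool) (cl : List (String × Bool))
    (rest : List (List (String × Bool))) (a : PySem.Dict String Bool)
    (hc : [] ∉ ((x, w) :: cl) :: rest)
    (hu : findUnitA (((x, w) :: cl) :: rest) = none) :
    recurA (((x, w) :: cl) :: rest) a =
      match recurA (update_expression (((x, w) :: cl) :: rest) [(x, true)]) (a.insert x true) with
      | some r => some r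
      | none => recurA (update_expression (((x, w) :: cl) :: rest) [(x, false)]) (a.insert x false) := by
  rw [recurA, if_neg (by simp : ¬(((x, w) :: cl) :: rest = [])), if_neg hc]
  split
  all_goals rename_i heq
  · rw [hu] at heq; simp at heq
  · rfl

lemma loopB_nil : loopB [] = none := by rw [loopB]

lemma loopB_sat (a : PySem.Dict String Bool) (st : List ((List (List (String × Bool))) × PySem.Dict String Bool)) :
    loopB (([], a) :: st) = some a := by
  rw [loopB]; simp

lemma loopB_conflict (f : List (List (String × Bool))) (a : PySem.Dict String Bool)
    (st : List ((List (List (String × Bool))) × PySem.Dict String Bool))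
    (hf : f ≠ []) (hc : [] ∈ f) : loopB ((f, a) :: st) = loopB st := by
  rw [loopB]; simp [hf, hc]

lemma loopB_unit (f : List (List (String × Bool))) (a : PySem.Dict String Bool)
    (st : List ((List (List (String × Bool))) × PySem.Dict String Bool))
    (x : String) (v : Bool) (tl : List (String × Bool))
    (hf : f ≠ []) (hc : [] ∉ f) (hu : f.find? (fun c => c.length == 1) = some ((x, v) :: tl)) :
    loopB ((f, a) :: st) = loopB ((assignB f x v, a.insert x v) :: st) := by
  rw [loopB, if_neg hf, if_neg hc]
  split
  all_goals rename_i heq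
  · rw [hu] at heq; simp at heq; obtain ⟨⟨rfl, rfl⟩, rfl⟩ := heq; rfl
  · rw [hu] at heq; simp at heq
  · rw [hu] at heq; simp at heq

lemma loopB_branch (x : String) (w : Bool) (cl : List (String × Bool))
    (rest : List (List (String × Bool))) (a : PySem.Dict String Bool)
    (st : List ((List (List (String × Bool))) × PySem.Dict String Bool))
    (hc : [] ∉ ((x, w) :: cl) :: rest)
    (hu : (((x, w) :: cl) :: rest).find? (fun c => c.length == 1) = none) :
    loopB ((((x, w) :: cl) :: rest, a) :: st) =
      loopB ((assignB (((x, w) :: cl) :: rest) x true, a.insert x true) ::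
             (assignB (((x, w) :: cl) :: rest) x false, a.insert x false) :: st) := by
  rw [loopB, if_neg (by simp : ¬(((x, w) :: cl) :: rest = [])), if_neg hc]
  split
  all_goals rename_i heq
  · rw [hu] at heq; simp at heq
  · rw [hu] at heq; simp at heq
  · rfl

theorem loopB_eq_recurA :
    ∀ st, loopB st = st.foldr (fun p acc => match recurA p.1 p.2 with
      | some r => some r | none => acc) none := by
  suffices H : ∀ n st, pvMeasure st < n → loopB st = st.foldr (fun p acc =>
      match recurA p.1 p.2 with | some r => some r | none => acc) none by
    intro st; exact H (pvMeasure st + 1) st (Nat.lt_succ_self _)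
  intro n
  induction n with
  | zero => intro st h; omega
  | succ n ih =>
    intro st hst
    match st with
    | [] => simp [loopB_nil]
    | (f, a) :: st' =>
      by_cases hf : f = []
      · subst hf; rw [loopB_sat]; simp [recurA_nil]
      · by_cases hcf : [] ∈ f
        · rw [loopB_conflict f a st' hf hcf]
          have := ih st' (by have := meas_pop f a st'; omega)
          rw [this]; simp [recurA_conflict f a hcf]
        · cases hu : f.find? (fun c => c.length == 1) with
          | some c =>
            have hpred := List.find?_some (p := fun c : List (String × Bool) => c.length == 1) hu
            have hmem : c ∈ f := List.mem_of_find?_eq_some hu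
            match c, hpred, hmem, hu with
            | (x, v) :: tl, hpred, hmem, hu =>
              have hfu : findUnitA f = some (x, v) := by
                rw [findUnitA_eq, hu]; rfl
              rw [loopB_unit f a st' x v tl hf hcf hu]
              have hlt : pvNumLits (assignB f x v) < pvNumLits f :=
                numLits_assignB_lt f x v _ hmem ⟨(x, v), by simp, rfl⟩
              have hm : pvMeasure ((assignB f x v, a.insert x v) :: st') < n := by
                have := meas_one a (a.insert x v) st' hlt; omega
              rw [ih _ hm]
              simp only [List.foldr_cons]
              rw [recurA_unit f a x v hf hcf hfu, update_eq_assign]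
          | none =>
            have hfu : findUnitA f = none := by rw [findUnitA_eq, hu]; rfl
            match f, hf, hcf, hu, hfu with
            | [] :: rest, hf, hcf, hu, hfu => exact absurd (List.mem_cons_self ..) hcf
            | ((x, w) :: cl) :: rest, hf, hcf, hu, hfu =>
              rw [loopB_branch x w cl rest a st' hcf hu]
              have hlt1 : pvNumLits (assignB (((x, w) :: cl) :: rest) x true) < pvNumLits (((x, w) :: cl) :: rest) :=
                numLits_assignB_lt _ x true ((x, w) :: cl) (List.mem_cons_self ..) ⟨(x, w), by simp, rfl⟩
              have hlt2 : pvNumLits (assignB (((x, w) :: cl) :: rest) x false) < pvNumLits (((x, w) :: cl) :: rest) :=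
                numLits_assignB_lt _ x false ((x, w) :: cl) (List.mem_cons_self ..) ⟨(x, w), by simp, rfl⟩
              have hm : pvMeasure ((assignB (((x, w) :: cl) :: rest) x true, a.insert x true) ::
                  (assignB (((x, w) :: cl) :: rest) x false, a.insert x false) :: st') < n := by
                have := meas_two a (a.insert x true) (a.insert x false) st' hlt1 hlt2; omega
              rw [ih _ hm]
              simp only [List.foldr_cons]
              rw [recurA_branch x w cl rest a hcf hfu]
              rw [update_eq_assign, update_eq_assign]
              cases recurA (assignB (((x, w) :: cl) :: rest) x true) (a.insert x true) <;>
                cases recurA (assignB (((x, w) :: cl) :: rest) x false) (a.insert x false) <;> simp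

-- ===== VERDICT (by name: the statement is the Claim_ definition above) =====
theorem satisfying_assignment_spec : Claim_equal_satisfying_assignment := by
  intro f _
  unfold Spec_satisfying_assignment satisfying_assignment satisfying_assignment_alt
  rw [loopB_eq_recurA]
  cases h : recurA f PySem.Dict.empty <;> simp [h]
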